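-- pv_equiv track=rewrite | github.com/BradmanLD/CP1804_Practicals | Prac10/testing.py | format_phrase
-- ===== SOURCE A (Python) =====
-- def format_phrase(phrase):
--     # Important: start with a function header and just use pass as the body
--     # then add doctests so that:
--     # 'hello' -> ''Hello.'
--     # 'It is an ex parrot.' -> 'It is an ex parrot.'
--     # and one more you decide (that's valid!)
--     # then write the body of the function so that the tests pass
--     """
--             >>> format_phrase("hello")
--             'Hello.'
--             >>> format_phrase("It is an ex parrot.")
--             'It is an ex parrot.'
--             >>> format_phrase("it did the thing.")
--             'It did the thing.'
--             """
--     formatted_phrase = phrase[0].upper()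
--     phrase = phrase[1:]
--     for i, letter in enumerate(phrase):
--         if i == len(phrase) - 1 and phrase[-1] != ".":
--             formatted_phrase += letter + "."
--         else:
--             formatted_phrase += letter
--     return formatted_phrase
-- ===== SOURCE B (Python) =====
-- def format_phrase(phrase):
--     tail = phrase[1:]
--     if tail and tail[-1] != ".":
--         tail += "."
--     return phrase[0].upper() + tail
-- ===== Notes on version B (the rewrite author's own statement) =====
-- stated objective: simpler
-- what changed: Replaced the enumerate loop that re-tests the last-index condition on every character with a single slice plus one conditional append of the period.
import Mathlib
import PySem

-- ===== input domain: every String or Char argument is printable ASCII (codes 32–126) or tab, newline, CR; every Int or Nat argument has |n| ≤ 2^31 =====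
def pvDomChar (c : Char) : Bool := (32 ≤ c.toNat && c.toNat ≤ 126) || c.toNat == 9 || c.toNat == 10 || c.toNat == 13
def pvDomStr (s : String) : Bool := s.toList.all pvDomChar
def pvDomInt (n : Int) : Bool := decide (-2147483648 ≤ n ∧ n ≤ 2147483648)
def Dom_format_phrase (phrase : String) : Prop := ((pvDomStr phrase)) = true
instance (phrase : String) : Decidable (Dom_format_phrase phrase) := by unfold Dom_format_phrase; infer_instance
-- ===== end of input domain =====

-- B is simpler: slice + one conditional period instead of A's indexed loop; return-value equivalence on nonempty inputs (both raise on "").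

-- ===== PORT A =====
-- formatted_phrase = phrase[0].upper(); phrase = phrase[1:]; for i, letter in enumerate(phrase): …
def format_phrase (phrase : String) : String :=
  match PySem.List.pyGet? phrase.toList 0 with
  | none => ""  -- Python raises IndexError here (excluded by Pre_)
  | some c =>
    let formatted : List Char := [PySem.Chars.upperChar c]
    let tail := PySem.List.slice phrase.toList (some 1) none
    String.mk (PySem.List.enumerate tail 0 |>.foldl
      (fun acc p =>
        if p.1 = (tail.length : Int) - 1 ∧ PySem.List.pyGet? tail (-1) ≠ some '.' then
          acc ++ [p.2, '.']
        else acc ++ [p.2]) formatted)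

-- ===== PORT B =====
-- tail = phrase[1:]; if tail and tail[-1] != ".": tail += "."; return phrase[0].upper() + tail
def format_phrase_alt (phrase : String) : String :=
  match PySem.List.pyGet? phrase.toList 0 with
  | none => ""  -- Python raises IndexError here (excluded by Pre_)
  | some c =>
    let tail := PySem.List.slice phrase.toList (some 1) none
    let tail2 := if tail ≠ [] ∧ PySem.List.pyGet? tail (-1) ≠ some '.' then tail ++ ['.'] else tail
    String.mk (PySem.Chars.upperChar c :: tail2)

-- ===== PRECONDITION & SPEC =====
-- Pre_ excludes only the empty string, where Python A raises IndexError (phrase[0]).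
def Pre_format_phrase (phrase : String) : Prop := phrase ≠ ""
instance (phrase : String) : Decidable (Pre_format_phrase phrase) := by unfold Pre_format_phrase; infer_instance
def pvWitness_format_phrase : String := "hello"

def Spec_format_phrase (phrase : String) (out : String) : Prop := out = format_phrase_alt phrase
instance (phrase : String) (out : String) : Decidable (Spec_format_phrase phrase out) := by unfold Spec_format_phrase; infer_instance

-- ===== CLAIM (what is proved, stated in full; the proofs are below) =====
def Claim_equal_format_phrase : Prop := ∀ (phrase : String), Dom_format_phrase phrase → Pre_format_phrase phrase → Spec_format_phrase phrase (format_phrase phrase)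

-- ===== LEMMAS AND PROOFS =====

-- A's loop over a suffix l of tail, starting at index s = |tail| - |l|, appends l and then '.' iff l is
-- nonempty and tail's last char is not '.'.
theorem format_phrase_loop (tail : List Char) (l : List Char) (s : Int) (acc : List Char)
    (hs : s = (tail.length : Int) - (l.length : Int)) :
    (PySem.List.enumerate l s).foldl
      (fun acc p =>
        if p.1 = (tail.length : Int) - 1 ∧ PySem.List.pyGet? tail (-1) ≠ some '.' then
          acc ++ [p.2, '.']
        else acc ++ [p.2]) acc
    = acc ++ l ++ (if l ≠ [] ∧ PySem.List.pyGet? tail (-1) ≠ some '.' then ['.'] else []) := by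
  induction l generalizing s acc with
  | nil => simp [PySem.List.enumerate_nil]
  | cons x xs ih =>
    rw [PySem.List.enumerate_cons, List.foldl_cons]
    cases xs with
    | nil =>
      have hlast : s = (tail.length : Int) - 1 := by simp at hs; omega
      by_cases hc : PySem.List.pyGet? tail (-1) ≠ some '.' <;>
        simp [PySem.List.enumerate_nil, hlast, hc]
    | cons y ys =>
      have hne : ¬ (s = (tail.length : Int) - 1 ∧ PySem.List.pyGet? tail (-1) ≠ some '.') := by
        intro ⟨h1, _⟩
        simp [List.length_cons] at hs
        omega
      rw [if_neg hne, ih (s + 1) _ (by simp at hs ⊢; omega)]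
      simp

-- ===== VERDICT (by name: the statement is the Claim_ definition above) =====
theorem format_phrase_spec : Claim_equal_format_phrase := by
  intro phrase _ hpre
  unfold Spec_format_phrase format_phrase format_phrase_alt
  have hne : phrase.toList ≠ [] := fun a => hpre (String.toList_eq_nil_iff.mp a)
  obtain ⟨c, rest, hcr⟩ := List.exists_cons_of_ne_nil hne
  rw [hcr, PySem.List.pyGet?_zero_cons]
  simp only [PySem.List.slice_from_one, List.tail_cons]
  rw [format_phrase_loop rest rest 0 _ (by simp)]
  by_cases h : rest ≠ [] ∧ PySem.List.pyGet? rest (-1) ≠ some '.'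
  · simp [h]
  · simp [h]
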